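-- pv_equiv track=rewrite | github.com/babenek/test | base64magic.py | check_asc_or_desc
-- ===== SOURCE A (Python) =====
-- import string
--
-- def check_asc_or_desc(line_data_value: str) -> bool:
--     """ValuePatternCheck as example"""
--     count_asc = 1
--     count_desc = 1
--     for i in range(len(line_data_value) - 1):
--         if line_data_value[i] in string.ascii_letters + string.digits \
--                 and ord(line_data_value[i + 1]) - ord(line_data_value[i]) == 1:
--             count_asc += 1
--             if 4 == count_asc:
--                 return True
--         else:
--             count_asc = 1
--         if line_data_value[i] in string.ascii_letters + string.digits \
--                 and ord(line_data_value[i]) - ord(line_data_value[i + 1]) == 1: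
--             count_desc += 1
--             if 4 == count_desc:
--                 return True
--         else:
--             count_desc = 1
--             continue
--     return False
-- ===== SOURCE B (Python) =====
-- import string
--
-- ALNUM = string.ascii_letters + string.digits
--
-- def check_asc_or_desc(line_data_value: str) -> bool:
--     """Sliding-window scan: does any 4-char window form a +1 or -1 run?"""
--     s = line_data_value
--     for j in range(len(s) - 3):
--         if (s[j] in ALNUM and s[j + 1] in ALNUM and s[j + 2] in ALNUM
--                 and (ord(s[j + 1]) - ord(s[j]) == 1
--                      and ord(s[j + 2]) - ord(s[j + 1]) == 1
--                      and ord(s[j + 3]) - ord(s[j + 2]) == 1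
--                      or ord(s[j + 1]) - ord(s[j]) == -1
--                      and ord(s[j + 2]) - ord(s[j + 1]) == -1
--                      and ord(s[j + 3]) - ord(s[j + 2]) == -1)):
--             return True
--     return False
-- ===== Notes on version B (the rewrite author's own statement) =====
-- stated objective: simpler
-- what changed: Replaces A's stateful scan with two running counters (count_asc/count_desc, resets, early returns) by a stateless sliding-window scan that directly tests each 4-char window for a uniform +1 or -1 ord run with the three left chars alnum.
import Mathlib
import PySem

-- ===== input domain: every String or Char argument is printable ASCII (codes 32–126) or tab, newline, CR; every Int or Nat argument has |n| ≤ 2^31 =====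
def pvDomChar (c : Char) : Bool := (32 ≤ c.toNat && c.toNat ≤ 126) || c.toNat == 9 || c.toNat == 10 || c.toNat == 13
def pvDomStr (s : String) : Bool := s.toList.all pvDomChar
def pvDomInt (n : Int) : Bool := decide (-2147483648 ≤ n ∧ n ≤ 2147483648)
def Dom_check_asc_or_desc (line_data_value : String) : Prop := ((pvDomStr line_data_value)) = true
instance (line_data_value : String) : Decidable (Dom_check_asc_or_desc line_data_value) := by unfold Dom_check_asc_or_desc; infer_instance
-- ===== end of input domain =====

-- B replaces A's two running counters by a direct sliding-window scan over all 4-char windows (objective: simpler).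

-- ===== PORT A =====
-- string.ascii_letters + string.digits
def pyAlnum : List Char :=
  "abcdefghijklmnopqrstuvwxyzABCDEFGHIJKLMNOPQRSTUVWXYZ0123456789".toList

-- A's loop over i in range(len-1) reads s[i], s[i+1]: structural recursion on the
-- char list with the two counters as state; the nested ifs mirror the sequential
-- asc-update (with early return) followed by the desc-update (with early return).
def aGo (count_asc count_desc : Int) : List Char → Bool
  | x :: y :: rest =>
    if pyAlnum.contains x && (((y.toNat : Int) - (x.toNat : Int)) == 1) then
      if count_asc + 1 == 4 then true
      else
        if pyAlnum.contains x && (((x.toNat : Int) - (y.toNat : Int)) == 1) then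
          if count_desc + 1 == 4 then true
          else aGo (count_asc + 1) (count_desc + 1) (y :: rest)
        else aGo (count_asc + 1) 1 (y :: rest)
    else
      if pyAlnum.contains x && (((x.toNat : Int) - (y.toNat : Int)) == 1) then
        if count_desc + 1 == 4 then true
        else aGo 1 (count_desc + 1) (y :: rest)
      else aGo 1 1 (y :: rest)
  | _ => false

def check_asc_or_desc (line_data_value : String) : Bool :=
  aGo 1 1 line_data_value.toList

-- ===== PORT B =====
-- one transition of Source B's window test: left char alnum and ord difference d
def stepB (a b : Char) (d : Int) : Bool :=
  pyAlnum.contains a && (((b.toNat : Int) - (a.toNat : Int)) == d)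

-- Source B's loop over j in range(len-3): each step tests the 4-char window at j
def altGo : List Char → Bool
  | a :: b :: c :: e :: rest =>
    ((stepB a b 1 && stepB b c 1 && stepB c e 1) ||
     (stepB a b (-1) && stepB b c (-1) && stepB c e (-1))) ||
    altGo (b :: c :: e :: rest)
  | _ => false

def check_asc_or_desc_alt (line_data_value : String) : Bool :=
  altGo line_data_value.toList

-- ===== PRECONDITION & SPEC =====
def Spec_check_asc_or_desc (line_data_value : String) (out : Bool) : Prop := out = check_asc_or_desc_alt line_data_value
instance (line_data_value : String) (out : Bool) : Decidable (Spec_check_asc_or_desc line_data_value out) := by unfold Spec_check_asc_or_desc; infer_instance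

-- ===== CLAIM (what is proved, stated in full; the proofs are below) =====
def Claim_equal_check_asc_or_desc : Prop := ∀ (line_data_value : String), Dom_check_asc_or_desc line_data_value → Spec_check_asc_or_desc line_data_value (check_asc_or_desc line_data_value)

-- ===== LEMMAS AND PROOFS =====

-- "the first k transitions of l all go in direction d"
def pref (d : Int) : Nat → List Char → Bool
  | 0, _ => true
  | k + 1, a :: b :: r => stepB a b d && pref d k (b :: r)
  | _ + 1, _ => false

lemma step_not_both {x y : Char} (h : stepB x y 1 = true) : stepB x y (-1) = false := by
  simp only [stepB, Bool.and_eq_true, beq_iff_eq] at h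
  simp only [stepB, h.1, Bool.true_and, beq_eq_false_iff_ne, ne_eq]
  omega

lemma desc_cond_eq (x y : Char) :
    (pyAlnum.contains x && (((x.toNat : Int) - (y.toNat : Int)) == 1)) = stepB x y (-1) := by
  have key : (((x.toNat : Int) - (y.toNat : Int)) == 1) = (((y.toNat : Int) - (x.toNat : Int)) == -1) := by
    rw [Bool.eq_iff_iff]
    simp only [beq_iff_eq]
    omega
  simp only [stepB, key]

lemma aGo_cons (ca cd : Int) (x y : Char) (r : List Char) :
    aGo ca cd (x :: y :: r) =
      if stepB x y 1 then (if ca + 1 == 4 then true else aGo (ca + 1) 1 (y :: r))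
      else if stepB x y (-1) then (if cd + 1 == 4 then true else aGo 1 (cd + 1) (y :: r))
      else aGo 1 1 (y :: r) := by
  show (if stepB x y 1 then _ else _) = _
  rw [desc_cond_eq]
  by_cases h : stepB x y 1 = true
  · simp [h, step_not_both h]
  · simp [h]

lemma pref_mono (d : Int) : ∀ (k k' : Nat) (l : List Char), k' ≤ k → pref d k l = true → pref d k' l = true := by
  intro k
  induction k with
  | zero => intro k' l hk _; interval_cases k'; assumption
  | succ n ih =>
    intro k' l hk h
    cases k' with
    | zero => rfl
    | succ m =>
      match l with
      | [] => simp [pref] at h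
      | [a] => simp [pref] at h
      | a :: b :: r =>
        simp only [pref, Bool.and_eq_true] at h ⊢
        exact ⟨h.1, ih m (b :: r) (by omega) h.2⟩

lemma pref3_imp_alt (d : Int) (hd : d = 1 ∨ d = -1) :
    ∀ l : List Char, pref d 3 l = true → altGo l = true := by
  intro l h
  match l with
  | [] | [a] | [a, b] | [a, b, c] => simp [pref] at h
  | a :: b :: c :: e :: r =>
    simp only [pref, Bool.and_eq_true] at h
    obtain ⟨h1, h2, h3, _⟩ := h
    rcases hd with rfl | rfl <;> simp [altGo, h1, h2, h3]

lemma altGo_cons (x y : Char) (r : List Char) :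
    altGo (x :: y :: r) =
      ((stepB x y 1 && pref 1 2 (y :: r)) || (stepB x y (-1) && pref (-1) 2 (y :: r)) ||
        altGo (y :: r)) := by
  match r with
  | [] => simp [altGo, pref]
  | [c] => simp [altGo, pref]
  | c :: e :: r' => simp [altGo, pref, Bool.and_assoc]

lemma aGo_eq : ∀ (l : List Char) (a b : Nat), a ≤ 2 → b ≤ 2 →
    aGo ((a : Int) + 1) ((b : Int) + 1) l =
      (pref 1 (3 - a) l || pref (-1) (3 - b) l || altGo l) := by
  intro l
  induction l with
  | nil =>
    intro a b ha hb
    have h3a : 3 - a = (2 - a) + 1 := by omega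
    have h3b : 3 - b = (2 - b) + 1 := by omega
    simp [aGo, altGo, h3a, h3b, pref]
  | cons x l' ih =>
    intro a b ha hb
    match l' with
    | [] =>
      have h3a : 3 - a = (2 - a) + 1 := by omega
      have h3b : 3 - b = (2 - b) + 1 := by omega
      simp [aGo, altGo, h3a, h3b, pref]
    | y :: r =>
      have h3a : 3 - a = (2 - a) + 1 := by omega
      have h3b : 3 - b = (2 - b) + 1 := by omega
      rw [aGo_cons, altGo_cons, h3a, h3b]
      by_cases h1 : stepB x y 1 = true
      · have h2 : stepB x y (-1) = false := step_not_both h1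
        simp only [h1, h2, if_true, pref, Bool.false_and, Bool.true_and]
        by_cases hfin : a = 2
        · subst hfin
          norm_num
          exact Or.inl rfl
        · have : ¬ ((a : Int) + 1 + 1 == 4) = true := by
            simp only [beq_iff_eq]; omega
          simp only [if_neg this]
          have hcast : (a : Int) + 1 + 1 = ((a + 1 : Nat) : Int) + 1 := by push_cast; ring
          have hIH := ih (a + 1) 0 (by omega) (by omega)
          simp only [Nat.cast_zero, zero_add, Nat.sub_zero] at hIH
          have h2a : 3 - (a + 1) = 2 - a := by omega
          rw [hcast, hIH, h2a]
          have hp3d := pref3_imp_alt (-1) (Or.inr rfl) (y :: r)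
          have hpm : pref 1 2 (y :: r) = true → pref 1 (2 - a) (y :: r) = true :=
            pref_mono 1 2 (2 - a) _ (by omega)
          rw [Bool.eq_iff_iff]
          simp only [Bool.or_eq_true, Bool.false_eq_true, or_false]
          tauto
      · by_cases h2 : stepB x y (-1) = true
        · have h1' : stepB x y 1 = false := by simpa using h1
          simp only [h1', h2, Bool.false_eq_true, if_false, if_true, pref,
            Bool.false_and, Bool.true_and]
          by_cases hfin : b = 2
          · subst hfin
            norm_num
            exact Or.inl rfl
          · have : ¬ ((b : Int) + 1 + 1 == 4) = true := by
              simp only [beq_iff_eq]; omega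
            simp only [if_neg this]
            have hcast : (b : Int) + 1 + 1 = ((b + 1 : Nat) : Int) + 1 := by push_cast; ring
            have hIH := ih 0 (b + 1) (by omega) (by omega)
            simp only [Nat.cast_zero, zero_add, Nat.sub_zero] at hIH
            have h2b : 3 - (b + 1) = 2 - b := by omega
            rw [hcast, hIH, h2b]
            have hp3a := pref3_imp_alt 1 (Or.inl rfl) (y :: r)
            have hpm : pref (-1) 2 (y :: r) = true → pref (-1) (2 - b) (y :: r) = true :=
              pref_mono (-1) 2 (2 - b) _ (by omega)
            rw [Bool.eq_iff_iff]
            simp only [Bool.or_eq_true, Bool.false_eq_true, or_false]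
            tauto
        · have h1' : stepB x y 1 = false := by simpa using h1
          have h2' : stepB x y (-1) = false := by simpa using h2
          simp only [h1', h2', Bool.false_eq_true, if_false, pref,
            Bool.false_and, Bool.false_or]
          have hIH := ih 0 0 (by omega) (by omega)
          simp only [Nat.cast_zero, zero_add, Nat.sub_zero] at hIH
          rw [hIH]
          have hp3a := pref3_imp_alt 1 (Or.inl rfl) (y :: r)
          have hp3d := pref3_imp_alt (-1) (Or.inr rfl) (y :: r)
          rw [Bool.eq_iff_iff]
          simp only [Bool.or_eq_true]
          tauto

-- ===== VERDICT (by name: the statement is the Claim_ definition above) =====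
theorem check_asc_or_desc_spec : Claim_equal_check_asc_or_desc := by
  intro s _
  show check_asc_or_desc s = check_asc_or_desc_alt s
  unfold check_asc_or_desc check_asc_or_desc_alt
  have h := aGo_eq s.toList 0 0 (by omega) (by omega)
  simp only [Nat.cast_zero, zero_add, Nat.sub_zero] at h
  rw [h]
  have hp3a := pref3_imp_alt 1 (Or.inl rfl) s.toList
  have hp3d := pref3_imp_alt (-1) (Or.inr rfl) s.toList
  rw [Bool.eq_iff_iff]
  simp only [Bool.or_eq_true]
  tauto
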